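-- pv_equiv track=rewrite | github.com/bitpyc/Finbench | Agents/aoa/offline_eval.py | _align_keys
-- ===== SOURCE A (Python) =====
-- from dataclasses import dataclass
-- from typing import Dict, Iterable, List, Optional, Sequence, Tuple
--
-- Key = Tuple[str, int]  # (task, index)
--
-- @dataclass(frozen=True)
-- class SampleInfo:
--     task: str
--     index: int
--     capability: str
--     difficulty_bucket: Optional[str]
--
-- def _align_keys(per_agent: Dict[str, Dict[Key, Tuple[SampleInfo, bool]]]) -> List[Key]:
--     keys = None
--     for _, m in per_agent.items():
--         k = set(m.keys())
--         keys = k if keys is None else keys.intersection(k)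
--     if not keys:
--         return []
--     return sorted(keys)
-- ===== SOURCE B (Python) =====
-- def _align_keys(per_agent):
--     counts = {}
--     for m in per_agent.values():
--         for k in m:
--             counts[k] = counts.get(k, 0) + 1
--     n = len(per_agent)
--     return sorted(k for k, c in counts.items() if c == n)
-- ===== Notes on version B (the rewrite author's own statement) =====
-- stated objective: alternative
-- what changed: Replaces progressive pairwise set intersection with a single count-then-threshold pass: one frequency table over all keys, keeping the keys whose count equals the number of agents.
import Mathlib
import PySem

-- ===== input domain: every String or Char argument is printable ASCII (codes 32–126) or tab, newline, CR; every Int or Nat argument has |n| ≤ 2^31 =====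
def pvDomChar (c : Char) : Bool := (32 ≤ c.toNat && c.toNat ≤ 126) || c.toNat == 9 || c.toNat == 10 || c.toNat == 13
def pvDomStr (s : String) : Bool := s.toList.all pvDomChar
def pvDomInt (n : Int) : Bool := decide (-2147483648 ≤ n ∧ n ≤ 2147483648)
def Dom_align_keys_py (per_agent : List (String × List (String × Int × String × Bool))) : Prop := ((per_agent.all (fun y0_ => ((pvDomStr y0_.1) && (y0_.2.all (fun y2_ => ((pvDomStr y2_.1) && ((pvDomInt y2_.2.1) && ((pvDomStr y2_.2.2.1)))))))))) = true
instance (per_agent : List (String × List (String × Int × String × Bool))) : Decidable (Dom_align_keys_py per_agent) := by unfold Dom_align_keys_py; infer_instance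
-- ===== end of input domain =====

-- B replaces A's progressive pairwise set intersection by one frequency table over all keys
-- plus a count == number-of-agents threshold (alternative decomposition, same cost).

-- shared input decoding: the key set of one agent's dict (set(m.keys()) / 'for k in m';
-- dicts arrive as association lists, so keys are the distinct pairs in insertion order)
def pyKeys (m : List (String × Int × String × Bool)) : PySem.Set (String × Int) :=
  PySem.Set.ofList (m.map (fun e => (e.1, e.2.1)))

-- ===== PORT A =====
def align_keys_py (per_agent : List (String × List (String × Int × String × Bool))) : List (String × Int) :=
  let d := PySem.Dict.ofList per_agent
  let keys : Option (PySem.Set (String × Int)) :=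
    d.items.foldl (fun keys m =>
      some (match keys with
            | none => pyKeys m.2
            | some ks => PySem.Set.inter ks (pyKeys m.2))) none
  match keys with
  | none => []
  | some ks => if ks.isEmpty then [] else PySem.List.sorted2 ks (·.1) (·.2)

-- ===== PORT B =====
def align_keys_py_alt (per_agent : List (String × List (String × Int × String × Bool))) : List (String × Int) :=
  let d := PySem.Dict.ofList per_agent
  let counts : PySem.Dict (String × Int) Int :=
    d.values.foldl (fun c m =>
      (pyKeys m).foldl (fun c k => c.insert k (c.getD k 0 + 1)) c) PySem.Dict.empty
  let n : Int := (d.size : Int)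
  PySem.List.sorted2 ((counts.items.filter (fun p => p.2 == n)).map (·.1)) (·.1) (·.2)

-- ===== PRECONDITION & SPEC =====
def Spec_align_keys_py (per_agent : List (String × List (String × Int × String × Bool))) (out : List (String × Int)) : Prop := out = align_keys_py_alt per_agent
instance (per_agent : List (String × List (String × Int × String × Bool))) (out : List (String × Int)) : Decidable (Spec_align_keys_py per_agent out) := by unfold Spec_align_keys_py; infer_instance

-- ===== CLAIM (what is proved, stated in full; the proofs are below) =====
def Claim_equal_align_keys_py : Prop := ∀ (per_agent : List (String × List (String × Int × String × Bool))), Dom_align_keys_py per_agent → Spec_align_keys_py per_agent (align_keys_py per_agent)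

-- ===== LEMMAS AND PROOFS =====

-- A's fold, once seeded with a set, is the iterated intersection
theorem foldl_some_inter (L : List (String × List (String × Int × String × Bool)))
    (s : PySem.Set (String × Int)) :
    L.foldl (fun keys m =>
      some (match keys with
            | none => pyKeys m.2
            | some ks => PySem.Set.inter ks (pyKeys m.2))) (some s)
      = some (L.foldl (fun ks m => PySem.Set.inter ks (pyKeys m.2)) s) := by
  induction L generalizing s with
  | nil => rfl
  | cons m t ih => simpa using ih (PySem.Set.inter s (pyKeys m.2))

-- iterated intersection = filter by membership in every later key set
theorem foldl_inter_eq_filter (L : List (String × List (String × Int × String × Bool)))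
    (s : PySem.Set (String × Int)) :
    L.foldl (fun ks m => PySem.Set.inter ks (pyKeys m.2)) s
      = s.filter (fun k => L.all (fun m => (pyKeys m.2).contains k)) := by
  induction L generalizing s with
  | nil => simp
  | cons m t ih =>
    rw [List.foldl_cons, ih]
    simp only [PySem.Set.inter, List.filter_filter, List.all_cons]
    exact List.filter_congr (fun x _ => by rw [Bool.and_comm])

-- the sorted() call already returns [] on an empty set, so A's early [] is redundant
theorem isEmpty_branch (l : List (String × Int)) :
    (if l.isEmpty then [] else PySem.List.sorted2 l (·.1) (·.2)) = PySem.List.sorted2 l (·.1) (·.2) := by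
  cases l <;> rfl

-- B's nested counting loop is Counter over the concatenation of all key sets
theorem counts_eq_counter (L : List (String × List (String × Int × String × Bool))) :
    L.foldl (fun c m =>
        (pyKeys m.2).foldl (fun c k => c.insert k (c.getD k 0 + 1)) c) PySem.Dict.empty
      = PySem.Dict.counter ((L.map (fun m => pyKeys m.2)).flatten) := by
  rw [← PySem.Dict.foldl_insert_getD_add_one_eq_counter, List.foldl_flatten, List.foldl_map]

theorem count_flatten_le (t : List (List (String × Int))) (k : String × Int)
    (hnd : ∀ s ∈ t, List.Nodup s) : t.flatten.count k ≤ t.length := by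
  induction t with
  | nil => simp
  | cons a b ih =>
    have h1 : a.count k ≤ 1 := List.nodup_iff_count_le_one.mp (hnd a (by simp)) k
    have h2 := ih (fun s hs => hnd s (by simp [hs]))
    simp only [List.flatten_cons, List.count_append, List.length_cons]
    omega

-- a key is counted once per agent list it occurs in, so count = #lists ↔ present in all
theorem count_flatten_eq_length_iff (t : List (List (String × Int))) (k : String × Int)
    (hnd : ∀ s ∈ t, List.Nodup s) :
    t.flatten.count k = t.length ↔ ∀ s ∈ t, k ∈ s := by
  induction t with
  | nil => simp
  | cons a b ih =>
    have h1 : a.count k ≤ 1 := List.nodup_iff_count_le_one.mp (hnd a (by simp)) k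
    have h2 : b.flatten.count k ≤ b.length := count_flatten_le b k (fun s hs => hnd s (by simp [hs]))
    have h3 := ih (fun s hs => hnd s (by simp [hs]))
    simp only [List.flatten_cons, List.count_append, List.length_cons, List.forall_mem_cons]
    constructor
    · intro h
      have ha : a.count k = 1 := by omega
      exact ⟨List.count_pos_iff.mp (by omega), h3.mp (by omega)⟩
    · rintro ⟨hm, hb⟩
      have := List.count_eq_one_of_mem (hnd a (by simp)) hm
      have := h3.mpr hb
      omega

-- ===== VERDICT (by name: the statement is the Claim_ definition above) =====
theorem align_keys_py_spec : Claim_equal_align_keys_py := by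
  intro per_agent _
  unfold Spec_align_keys_py align_keys_py align_keys_py_alt
  simp only [PySem.Dict.values, List.foldl_map, counts_eq_counter, PySem.Dict.items_counter,
    List.filter_map, List.map_map, PySem.Dict.size]
  set L := (PySem.Dict.ofList per_agent).items with hL
  cases hC : L with
  | nil => rfl
  | cons m t =>
    -- A's side: the fold is the intersection of all key sets, a filter of the first one
    rw [List.foldl_cons]
    show (match
        t.foldl (fun keys m =>
          some (match keys with
                | none => pyKeys m.2
                | some ks => PySem.Set.inter ks (pyKeys m.2))) (some (pyKeys m.2)) with
      | none => []
      | some ks => if ks.isEmpty then [] else PySem.List.sorted2 ks (·.1) (·.2)) = _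
    rw [foldl_some_inter, foldl_inter_eq_filter]
    simp only [isEmpty_branch]
    -- B's side: decompose set(all keys) as (keys of agent 1) ++ (new keys of later agents)
    have hnodup : (pyKeys m.2).Nodup := PySem.Set.nodup_ofList _
    set s : List (String × Int) := pyKeys m.2 with hs
    set flat : List (String × Int) := ((m :: t).map (fun m => pyKeys m.2)).flatten with hflat
    refine congrArg (fun l : List (String × Int) => PySem.List.sorted2 l (·.1) (·.2)) ?_
    simp only [Function.comp_def, List.map_id']
    have hflat' : flat = s ++ (t.map (fun m => pyKeys m.2)).flatten := by simp only [hflat, List.map_cons, List.flatten_cons, hs]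
    have hndt : ∀ u ∈ t.map (fun m => pyKeys m.2), List.Nodup u := by
      intro u hu
      obtain ⟨m', _, rfl⟩ := List.mem_map.mp hu
      exact PySem.Set.nodup_ofList _
    have hle : ∀ k : String × Int, ((t.map (fun m => pyKeys m.2)).flatten).count k ≤ t.length := by
      intro k
      have := count_flatten_le (t.map (fun m => pyKeys m.2)) k hndt
      simpa using this
    have hset : PySem.Set.ofList flat
        = s ++ (PySem.Set.ofList ((t.map (fun m => pyKeys m.2)).flatten)).filter
            (fun y => !(PySem.Set.contains s y)) := by
      rw [hflat', PySem.Set.ofList_append, PySem.Set.update_eq_append_filter,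
        PySem.Set.ofList_eq_self_of_nodup s hnodup]
    rw [hset, List.filter_append]
    -- keys not in agent 1's set are counted at most t.length < t.length + 1 times
    have hright : ((PySem.Set.ofList ((t.map (fun m => pyKeys m.2)).flatten)).filter
          (fun y => !(PySem.Set.contains s y))).filter
          (fun x => ((flat.count x : Int) == ((m :: t : List _).length : Int))) = [] := by
      rw [List.filter_eq_nil_iff]
      intro k hk
      have hks : k ∉ s := by
        have := (List.mem_filter.mp hk).2
        simpa [PySem.Set.contains_iff] using this
      have h0 : s.count k = 0 := List.count_eq_zero.mpr hks
      have hcnt : flat.count k ≤ t.length := by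
        rw [hflat', List.count_append, h0]
        simpa using hle k
      simp only [beq_iff_eq, Int.natCast_inj, List.length_cons]
      omega
    rw [hright, List.append_nil]
    -- on agent 1's keys: counted t.length + 1 times ↔ present in every later key set
    refine List.filter_congr ?_
    intro k hk
    have h1 : s.count k = 1 := List.count_eq_one_of_mem hnodup hk
    have hiff := count_flatten_eq_length_iff (t.map (fun m => pyKeys m.2)) k hndt
    rw [Bool.eq_iff_iff]
    simp only [List.all_eq_true, beq_iff_eq, Int.natCast_inj, List.length_cons]
    rw [hflat', List.count_append, h1]
    constructor
    · intro h
      have hall : ∀ u ∈ t.map (fun m => pyKeys m.2), k ∈ u := by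
        intro u hu
        obtain ⟨m', hm', rfl⟩ := List.mem_map.mp hu
        have := h m' hm'
        simpa [PySem.Set.contains_iff] using this
      have hc := hiff.mpr hall
      rw [List.length_map] at hc
      omega
    · intro h
      have hc : ((t.map (fun m => pyKeys m.2)).flatten).count k = (t.map (fun m => pyKeys m.2)).length := by
        rw [List.length_map]
        omega
      intro m' hm'
      have := hiff.mp hc (pyKeys m'.2) (List.mem_map_of_mem hm')
      simpa [PySem.Set.contains_iff] using this
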